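-- pv_equiv track=rewrite | github.com/egoavara/CodingTest | 2023 KAKAO blind recuitment/1st/q4.py | solution
-- ===== SOURCE A (Python) =====
-- def solution(numbers):
--     availables = {"010", "011", "110", "111", "11", "01"}
--     def calc(num):
--         b= bin(num)[2:]
--         start = 0
--         end = min(3, len(b))
--         while start < end:
--             if b[start:end] not in availables:
--                 return 0
--             if end < len(b) and b[end] != "1":
--                 return 0
--             start = min(end + 1, len(b))
--             end = min(start + 3, len(b))
--         return 1
--     return list(map(calc, numbers))
-- ===== SOURCE B (Python) =====
-- def solution(numbers):
--     # purely arithmetic validity test: a positive num is valid iff its bit-length n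
--     # satisfies n % 4 != 1 and every second bit (counted from the low end, starting
--     # at parity n % 2, i.e. every odd position from the left) is set; no binary
--     # string and no allowed-chunk set are built at all.
--     def ok(num):
--         if num <= 0:
--             return 0
--         n = num.bit_length()
--         if n % 4 == 1:
--             return 0
--         for j in range(n % 2, n, 2):
--             if not (num >> j) & 1:
--                 return 0
--         return 1
--     return [ok(num) for num in numbers]
-- ===== Notes on version B (the rewrite author's own statement) =====
-- stated objective: faster
-- what changed: A builds bin(num)[2:] and scans it with a cursor-driven while loop checking 3-character chunks against an allowed-string set and '1' separators; B builds no string and uses no set at all: it decides validity arithmetically from num.bit_length() (n % 4 != 1) plus a bit-shift test that every second bit from the low end (parity n % 2) is set.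
import Mathlib
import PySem

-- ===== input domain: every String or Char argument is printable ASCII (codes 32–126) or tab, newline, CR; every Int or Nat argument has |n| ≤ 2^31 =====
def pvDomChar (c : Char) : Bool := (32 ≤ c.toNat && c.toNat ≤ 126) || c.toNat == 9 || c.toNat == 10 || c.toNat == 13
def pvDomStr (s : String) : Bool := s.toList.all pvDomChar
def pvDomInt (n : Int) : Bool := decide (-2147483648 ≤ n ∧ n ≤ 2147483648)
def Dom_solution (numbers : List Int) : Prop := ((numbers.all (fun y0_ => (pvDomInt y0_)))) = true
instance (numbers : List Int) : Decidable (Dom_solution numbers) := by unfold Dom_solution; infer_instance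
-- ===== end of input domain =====

-- A scans the string bin(num)[2:] with a cursor while-loop against an allowed-chunk set; B builds no
-- string and no set: it decides validity arithmetically from bit_length and bit shifts (measured faster in a timing run).

-- ===== PORT A =====
-- availables = {"010", "011", "110", "111", "11", "01"}
def pvAvailA : PySem.Set (List Char) :=
  PySem.Set.ofList [['0','1','0'], ['0','1','1'], ['1','1','0'], ['1','1','1'], ['1','1'], ['0','1']]

-- the while loop of calc; fuel = len(b)+1 suffices since start strictly increases while the loop runs
def pvCalcLoop (b : List Char) : Nat → Nat → Nat → Int
  | 0, _, _ => 1
  | fuel + 1, start, en =>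
    if start < en then
      if !(pvAvailA.contains (PySem.List.slice b (some (start : Int)) (some (en : Int)))) then 0
      else if en < b.length && !(b.getD en ' ' == '1') then 0
      else
        let start' := min (en + 1) b.length
        pvCalcLoop b fuel start' (min (start' + 3) b.length)
    else 1

def pvCalc (num : Int) : Int :=
  let b := PySem.List.slice (PySem.Int.toBinChars0b num) (some 2) none
  pvCalcLoop b (b.length + 1) 0 (min 3 b.length)

def solution (numbers : List Int) : List Int := numbers.map pvCalc

-- ===== PORT B =====
-- ok(num): no string, no set — num <= 0 is invalid; otherwise n = num.bit_length(), reject n % 4 == 1,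
-- then reject if any bit at position j in range(n % 2, n, 2) is clear ('not (num >> j) & 1').
-- num > 0 here, so 'num >> j' is ported on nonnegative Ints via '>>> j.toNat' (exact for j ≥ 0).
def pvOkB (num : Int) : Int :=
  if num ≤ 0 then 0
  else
    let n : Nat := PySem.Int.bitLength num
    if n % 4 == 1 then 0
    else if (PySem.List.pyRange ((n % 2 : Nat) : Int) ((n : Nat) : Int) 2).any
        (fun j => PySem.Int.band (num >>> j.toNat) 1 == 0) then 0
    else 1

def solution_alt (numbers : List Int) : List Int := numbers.map pvOkB

-- ===== PRECONDITION & SPEC =====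
def Spec_solution (numbers : List Int) (out : List Int) : Prop := out = solution_alt numbers
instance (numbers : List Int) (out : List Int) : Decidable (Spec_solution numbers out) := by unfold Spec_solution; infer_instance

-- ===== CLAIM =====
def Claim_equal_solution : Prop := ∀ (numbers : List Int), Dom_solution numbers → Spec_solution numbers (solution numbers)

-- ===== LEMMAS AND PROOFS =====

-- reference predicates for A's loop: all strided 3-bit chunks allowed / all separator bits '1'
def pvChunksOK : List Char → Bool
  | [] => true
  | c :: rest => pvAvailA.contains (c :: rest.take 2) && pvChunksOK (rest.drop 3)
termination_by b => b.length
decreasing_by simp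

def pvSepsOK (b : List Char) : Bool :=
  if b.length ≤ 3 then true
  else (b[3]? == some '1') && pvSepsOK (b.drop 4)
termination_by b.length
decreasing_by simp; omega

lemma pvChunksOK_cons (c : Char) (rest : List Char) :
    pvChunksOK (c :: rest) = (pvAvailA.contains ((c :: rest).take 3) && pvChunksOK ((c :: rest).drop 4)) := by
  rw [pvChunksOK]
  rfl

lemma pvChunksOK_nonempty (b : List Char) (h : b ≠ []) :
    pvChunksOK b = (pvAvailA.contains (b.take 3) && pvChunksOK (b.drop 4)) := by
  cases b with
  | nil => exact absurd rfl h
  | cons c rest => exact pvChunksOK_cons c rest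

-- A's while loop computes the conjunction of the two reference predicates on the remaining suffix
lemma pvCalcLoop_eq (fuel : Nat) : ∀ (b : List Char) (s : Nat), b.length ≤ fuel + s →
    pvCalcLoop b fuel s (min (s + 3) b.length) =
      if pvChunksOK (b.drop s) && pvSepsOK (b.drop s) then 1 else 0 := by
  induction fuel with
  | zero =>
    intro b s h
    have hd : b.drop s = [] := List.drop_eq_nil_of_le (by omega)
    rw [hd, pvSepsOK]
    simp [pvCalcLoop, pvChunksOK]
  | succ fuel ih =>
    intro b s h
    by_cases hs : s < b.length
    · have hne : b.drop s ≠ [] := by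
        intro hc
        have := List.drop_eq_nil_iff.mp hc
        omega
      have hlen : (b.drop s).length = b.length - s := List.length_drop
      have hcond : s < min (s + 3) b.length := by omega
      have hchunk : PySem.List.slice b (some (s : Int)) (some ((min (s + 3) b.length : Nat) : Int))
          = (b.drop s).take 3 := by
        rw [PySem.List.slice_natCast]
        by_cases hc : s + 3 ≤ b.length
        · congr 1; omega
        · rw [show min (s + 3) b.length - s = b.length - s by omega]
          rw [List.take_of_length_le (by omega), List.take_of_length_le (by omega)]
      rw [pvCalcLoop, if_pos hcond, hchunk]
      by_cases hA : pvAvailA.contains ((b.drop s).take 3)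
      · rw [pvChunksOK_nonempty _ hne, hA]
        by_cases h3 : b.length ≤ s + 3
        · have hmin : min (s + 3) b.length = b.length := by omega
          have hsep : pvSepsOK (b.drop s) = true := by rw [pvSepsOK]; simp [hlen]; omega
          have hd4 : (b.drop s).drop 4 = [] := by
            apply List.drop_eq_nil_of_le; omega
          have hs' : min (b.length + 1) b.length = b.length := by omega
          rw [hmin]
          simp only [lt_irrefl, decide_false, Bool.false_and, Bool.not_eq_true', hs']
          rw [ih b b.length (by omega)]
          have : b.drop b.length = [] := by simp
          have hsnil : pvSepsOK ([] : List Char) = true := by rw [pvSepsOK]; simp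
          rw [this, hd4, hsep]
          simp [pvChunksOK, hsnil]
        · have hmin : min (s + 3) b.length = s + 3 := by omega
          have hget : b.getD (s + 3) ' ' = b[s + 3]'(by omega) := by
            rw [List.getD_eq_getElem?_getD, List.getElem?_eq_getElem (by omega)]
            rfl
          have ht3 : (b.drop s)[3]? = some (b[s + 3]'(by omega)) := by
            rw [List.getElem?_drop, List.getElem?_eq_getElem (by omega)]
          have hsep : pvSepsOK (b.drop s) = ((b[s + 3]'(by omega) == '1') && pvSepsOK ((b.drop s).drop 4)) := by
            rw [pvSepsOK, if_neg (by omega), ht3]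
            simp
          rw [hmin, hsep]
          by_cases h1 : b[s + 3]'(by omega) == '1'
          · have hlt : (decide (s + 3 < b.length) && !(b.getD (s + 3) ' ' == '1')) = false := by
              rw [hget, h1]; simp
            rw [hlt, if_neg (by simp)]
            have hs' : min (s + 3 + 1) b.length = s + 4 := by omega
            rw [hs', ih b (s + 4) (by omega)]
            have hdd : b.drop (s + 4) = (b.drop s).drop 4 := by
              rw [List.drop_drop]
            rw [hdd, h1]
            simp
          · simp only [Bool.not_eq_true] at h1
            have hlt : (decide (s + 3 < b.length) && !(b.getD (s + 3) ' ' == '1')) = true := by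
              rw [hget, h1]
              simp
              omega
            rw [hlt, h1]
            simp
      · rw [pvChunksOK_nonempty _ hne]
        simp only [Bool.not_eq_true] at hA
        rw [hA]
        simp
    · have hd : b.drop s = [] := List.drop_eq_nil_of_le (by omega)
      have : ¬ (s < min (s + 3) b.length) := by omega
      rw [pvCalcLoop, if_neg this, hd, pvSepsOK]
      simp [pvChunksOK]

-- a chunk starting with 'b' (the negative-input case) is never in the allowed set
lemma pvAvail_b (t : List Char) : pvAvailA.contains ('b' :: t) = false := by
  show List.contains _ _ = false
  simp only [List.contains_eq_any_beq]
  simp [pvAvailA, PySem.Set.ofList]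

lemma pvChunksOK_nil : pvChunksOK [] = true := by rw [pvChunksOK]

-- every second character, starting at index 1
def pvOddOnes : List Char → Bool
  | [] => true
  | [_] => true
  | _ :: d :: rest => (d == '1') && pvOddOnes rest

-- fuel-independence and accumulator laws of Nat.toDigitsCore (base 2), and the MSB recursion
lemma pvTdcAcc : ∀ (f n : Nat) (l : List Char),
    Nat.toDigitsCore 2 f n l = Nat.toDigitsCore 2 f n [] ++ l := by
  intro f
  induction f with
  | zero => intro n l; rw [Nat.toDigitsCore, Nat.toDigitsCore]; simp
  | succ f ih =>
    intro n l
    rw [Nat.toDigitsCore, Nat.toDigitsCore]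
    by_cases h : n / 2 = 0
    · simp [h]
    · simp only [h]
      rw [ih (n / 2) ((n % 2).digitChar :: l), ih (n / 2) [(n % 2).digitChar]]
      simp

lemma pvTdcFuel : ∀ (f f' n : Nat) (l : List Char), n < f → n < f' →
    Nat.toDigitsCore 2 f n l = Nat.toDigitsCore 2 f' n l := by
  intro f
  induction f with
  | zero => intro f' n l h; omega
  | succ f ih =>
    intro f' n l h h'
    cases f' with
    | zero => omega
    | succ f' =>
      rw [Nat.toDigitsCore, Nat.toDigitsCore]
      by_cases hz : n / 2 = 0
      · simp [hz]
      · simp only [hz]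
        exact ih f' (n / 2) _ (by omega) (by omega)

lemma pvToDigits2_step (m : Nat) (h : 2 ≤ m) :
    Nat.toDigits 2 m = Nat.toDigits 2 (m / 2) ++ [(m % 2).digitChar] := by
  unfold Nat.toDigits
  rw [Nat.toDigitsCore]
  have hz : ¬ (m / 2 = 0) := by omega
  rw [if_neg hz]
  rw [pvTdcAcc m (m / 2) [(m % 2).digitChar]]
  rw [pvTdcFuel m (m / 2 + 1) (m / 2) [] (by omega) (by omega)]

-- length of the binary digit string = bit_length
lemma pvToDigits2_len (m : Nat) (h : 1 ≤ m) :
    ((Nat.toDigits 2 m).length : Nat) = PySem.Int.bitLength (m : Int) := by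
  induction m using Nat.strong_induction_on with
  | _ m ih =>
    by_cases h2 : 2 ≤ m
    · rw [pvToDigits2_step m h2, List.length_append,
        ih (m / 2) (by omega) (by omega), PySem.Int.bitLength_natCast (m := m) (by omega)]
      simp
    · have hm1 : m = 1 := by omega
      subst hm1
      decide

-- the i-th character (MSB first) is the (len-1-i)-th bit
lemma pvToDigits2_get (m : Nat) (h : 1 ≤ m) :
    ∀ (i : Nat) (hi : i < (Nat.toDigits 2 m).length),
      (Nat.toDigits 2 m)[i] =
        if m.testBit ((Nat.toDigits 2 m).length - 1 - i) then '1' else '0' := by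
  induction m using Nat.strong_induction_on with
  | _ m ih =>
    intro i hi
    by_cases h2 : 2 ≤ m
    · have hstep := pvToDigits2_step m h2
      have hlen : (Nat.toDigits 2 m).length = (Nat.toDigits 2 (m / 2)).length + 1 := by
        rw [hstep]; simp
      by_cases hlast : i < (Nat.toDigits 2 (m / 2)).length
      · have hget : (Nat.toDigits 2 m)[i]'hi = (Nat.toDigits 2 (m / 2))[i]'hlast := by
          rw [List.getElem_of_eq hstep hi, List.getElem_append_left hlast]
        rw [hget, ih (m / 2) (by omega) (by omega) i hlast, hlen]
        have harith : (Nat.toDigits 2 (m / 2)).length + 1 - 1 - i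
            = ((Nat.toDigits 2 (m / 2)).length - 1 - i) + 1 := by omega
        rw [harith, Nat.testBit_add_one]
      · have hieq : i = (Nat.toDigits 2 (m / 2)).length := by omega
        have hget : (Nat.toDigits 2 m)[i]'hi = (m % 2).digitChar := by
          rw [List.getElem_of_eq hstep hi]
          rw [List.getElem_append_right (by omega)]
          simp [hieq]
        rw [hget, hlen, hieq]
        have : (Nat.toDigits 2 (m / 2)).length + 1 - 1 - (Nat.toDigits 2 (m / 2)).length = 0 := by omega
        rw [this, Nat.testBit_zero]
        rcases Nat.mod_two_eq_zero_or_one m with hm | hm <;> rw [hm] <;> simp [Nat.digitChar]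
    · have hm1 : m = 1 := by omega
      subst hm1
      have h1 : Nat.toDigits 2 1 = ['1'] := by decide
      have hi0 : i = 0 := by
        rw [h1] at hi
        simp at hi
        omega
      subst hi0
      simp [h1]

-- all characters of the binary string are '0' or '1'
lemma pvToDigits2_bin (m : Nat) (h : 1 ≤ m) :
    ∀ c ∈ Nat.toDigits 2 m, c = '0' ∨ c = '1' := by
  intro c hc
  obtain ⟨i, hi, hget⟩ := List.mem_iff_getElem.mp hc
  rw [pvToDigits2_get m h i hi] at hget
  split at hget
  · right; exact hget.symm
  · left; exact hget.symm

-- over a 0/1 string, A's chunk-and-separator predicate IS "length % 4 ≠ 1 and every odd index holds '1'"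
lemma pvChunkSep_eq_oddOnes_aux : ∀ (n : Nat) (b : List Char), b.length ≤ n →
    (∀ c ∈ b, c = '0' ∨ c = '1') →
    (pvChunksOK b && pvSepsOK b) = (decide (b.length % 4 ≠ 1) && pvOddOnes b) := by
  intro n
  induction n with
  | zero =>
    intro b hlen _
    have hb : b = [] := List.eq_nil_of_length_eq_zero (by omega)
    subst hb
    rw [pvSepsOK]
    simp [pvChunksOK_nil, pvOddOnes]
  | succ n ih =>
    intro b hlen hbin
    match b, hlen, hbin with
    | [], _, _ =>
      rw [pvSepsOK]
      simp [pvChunksOK_nil, pvOddOnes]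
    | [c], _, hbin =>
      rw [pvSepsOK]
      rcases hbin c (by simp) with h | h <;> subst h <;>
        · simp [pvChunksOK_cons, pvChunksOK_nil, pvOddOnes]
          decide
    | [c, d], _, hbin =>
      rw [pvSepsOK]
      rcases hbin c (by simp) with h | h <;> rcases hbin d (by simp) with h' | h' <;>
        subst h <;> subst h' <;>
        · simp [pvChunksOK_cons, pvChunksOK_nil, pvOddOnes]
          decide
    | [c, d, e], _, hbin =>
      rw [pvSepsOK]
      rcases hbin c (by simp) with h | h <;> rcases hbin d (by simp) with h' | h' <;>
        rcases hbin e (by simp) with h'' | h'' <;> subst h <;> subst h' <;> subst h'' <;>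
        · simp [pvChunksOK_cons, pvChunksOK_nil, pvOddOnes]
          decide
    | c :: d :: e :: f :: rest, hlen, hbin =>
      have hc := hbin c (by simp)
      have hd := hbin d (by simp)
      have he := hbin e (by simp)
      have hcontains : (decide ([c, d, e] ∈ pvAvailA)) = (d == '1') := by
        rcases hc with h | h <;> rcases hd with h' | h' <;> rcases he with h'' | h'' <;>
          subst h <;> subst h' <;> subst h'' <;> decide
      have hchunks : pvChunksOK (c :: d :: e :: f :: rest) = ((d == '1') && pvChunksOK rest) := by
        rw [pvChunksOK_cons]
        simp [hcontains]
      have hseps : pvSepsOK (c :: d :: e :: f :: rest) = ((f == '1') && pvSepsOK rest) := by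
        rw [pvSepsOK]
        simp
      have hih := ih rest (by simp only [List.length_cons] at hlen; omega)
        (fun x hx => hbin x (by simp [hx]))
      have hlen' : decide ((c :: d :: e :: f :: rest).length % 4 ≠ 1)
          = decide (rest.length % 4 ≠ 1) := by
        simp only [List.length_cons]
        exact decide_eq_decide.mpr (by omega)
      have hodd : pvOddOnes (c :: d :: e :: f :: rest)
          = ((d == '1') && ((f == '1') && pvOddOnes rest)) := rfl
      rw [hchunks, hseps, hlen', hodd]
      cases hdv : (d == '1') <;> cases hfv : (f == '1') <;>
        simp_all [Bool.and_comm]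

lemma pvChunkSep_eq_oddOnes (b : List Char) (hbin : ∀ c ∈ b, c = '0' ∨ c = '1') :
    (pvChunksOK b && pvSepsOK b) = (decide (b.length % 4 ≠ 1) && pvOddOnes b) :=
  pvChunkSep_eq_oddOnes_aux b.length b le_rfl hbin

-- pvOddOnes as a pointwise statement
lemma pvOddOnes_iff : ∀ (b : List Char),
    pvOddOnes b = true ↔ ∀ (i : Nat) (hi : i < b.length), i % 2 = 1 → b[i] = '1' := by
  intro b
  induction b using pvOddOnes.induct with
  | case1 => simp [pvOddOnes]
  | case2 c =>
    simp only [pvOddOnes, true_iff, List.length_cons]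
    intro i hi h1
    simp at hi
    omega
  | case3 c d rest ih =>
    rw [pvOddOnes]
    constructor
    · intro h i hi h1
      simp only [Bool.and_eq_true, beq_iff_eq] at h
      rcases i with _ | _ | k
      · omega
      · simpa using h.1
      · simp only [List.getElem_cons_succ]
        exact ih.mp h.2 k (by simp only [List.length_cons] at hi; omega) (by omega)
    · intro h
      simp only [Bool.and_eq_true, beq_iff_eq]
      refine ⟨by simpa using h 1 (by simp) (by omega), ih.mpr ?_⟩
      intro k hk h1
      have := h (k + 2) (by simp only [List.length_cons]; omega) (by omega)
      simpa using this

-- Python's '(num >> j) & 1' on a nonnegative int reads a bit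
lemma pvBand1 (m k : Nat) :
    (PySem.Int.band ((m : Int) >>> k) 1 == 0) = !(m.testBit k) := by
  rw [← Int.natCast_shiftRight, show (1 : Int) = ((1 : Nat) : Int) from rfl,
    PySem.Int.band_natCast]
  rw [Nat.and_one_is_mod, Nat.testBit_eq_decide_div_mod_eq, ← Nat.shiftRight_eq_div_pow]
  rcases Nat.mod_two_eq_zero_or_one (m >>> k) with h | h <;> rw [h] <;> simp

-- the strided-bit test of B equals the odd-position test on a string whose characters are the bits
lemma pvAny_eq (m : Nat) (b : List Char)
    (hget : ∀ (i : Nat) (hi : i < b.length), b[i] = if m.testBit (b.length - 1 - i) then '1' else '0') :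
    (PySem.List.pyRange ((b.length % 2 : Nat) : Int) ((b.length : Nat) : Int) 2).any
      (fun j => PySem.Int.band ((m : Int) >>> j.toNat) 1 == 0) = !(pvOddOnes b) := by
  rcases hodd : pvOddOnes b with _ | _
  · -- some odd position of b is not '1': produce a clear bit
    simp only [Bool.not_false]
    rw [List.any_eq_true]
    have hex : ¬ ∀ (i : Nat) (hi : i < b.length), i % 2 = 1 → b[i] = '1' := by
      intro hall
      have htrue := (pvOddOnes_iff b).mpr hall
      simp [hodd] at htrue
    push Not at hex
    obtain ⟨i, hi, hodd_i, hne⟩ := hex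
    refine ⟨((b.length - 1 - i : Nat) : Int), ?_, ?_⟩
    · rw [PySem.List.mem_pyRange_iff_of_pos (by norm_num)]
      refine ⟨by omega, by omega, by omega⟩
    · rw [show (((b.length - 1 - i : Nat) : Int)).toNat = b.length - 1 - i from by omega, pvBand1]
      have hgi := hget i hi
      rcases htb : m.testBit (b.length - 1 - i) with _ | _
      · simp
      · rw [htb] at hgi
        simp at hgi
        exact absurd hgi hne
  · -- every odd position is '1': no sampled bit is clear
    simp only [Bool.not_true]
    rw [List.any_eq_false]
    intro j hj
    rw [PySem.List.mem_pyRange_iff_of_pos (by norm_num)] at hj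
    obtain ⟨hj1, hj2, hj3⟩ := hj
    have hj0 : 0 ≤ j := le_trans (by positivity) hj1
    have hb1 : 1 ≤ b.length := by
      by_contra hc
      omega
    have hgood := (pvOddOnes_iff b).mp hodd (b.length - 1 - j.toNat) (by omega) (by omega)
    rw [hget (b.length - 1 - j.toNat) (by omega)] at hgood
    have hjj : b.length - 1 - (b.length - 1 - j.toNat) = j.toNat := by omega
    rw [hjj] at hgood
    rcases htb : m.testBit j.toNat with _ | _
    · rw [htb] at hgood
      simp at hgood
    · rw [pvBand1, htb]
      simp

-- the two rejection tests agree for a positive input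
lemma pvMain (num : Int) (hpos : 0 < num) : pvCalc num = pvOkB num := by
  obtain ⟨m, rfl⟩ : ∃ m : Nat, num = (m : Int) := ⟨num.toNat, by omega⟩
  have hm1 : 1 ≤ m := by exact_mod_cast hpos
  have hb : PySem.List.slice (PySem.Int.toBinChars0b (m : Int)) (some 2) none
      = Nat.toDigits 2 m := by
    rw [PySem.Int.toBinChars0b, if_neg (by omega), PySem.List.slice_some_none]
    simp [PySem.List.clampIdx]
  have hA : pvCalc (m : Int)
      = if pvChunksOK (Nat.toDigits 2 m) && pvSepsOK (Nat.toDigits 2 m) then 1 else 0 := by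
    unfold pvCalc
    simp only [hb]
    rw [show min 3 (Nat.toDigits 2 m).length = min (0 + 3) (Nat.toDigits 2 m).length from by omega,
      pvCalcLoop_eq ((Nat.toDigits 2 m).length + 1) (Nat.toDigits 2 m) 0 (by omega), List.drop_zero]
  have hlen : (Nat.toDigits 2 m).length = PySem.Int.bitLength (m : Int) := pvToDigits2_len m hm1
  have hany := pvAny_eq m (Nat.toDigits 2 m) (pvToDigits2_get m hm1)
  rw [hA, pvChunkSep_eq_oddOnes _ (pvToDigits2_bin m hm1)]
  unfold pvOkB
  rw [if_neg (show ¬ ((m : Int) ≤ 0) by omega)]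
  simp only [← hlen]
  rw [hany]
  by_cases h4 : (Nat.toDigits 2 m).length % 4 = 1
  · simp [h4]
  · cases pvOddOnes (Nat.toDigits 2 m) <;> simp [h4]

-- the Python functions agree pointwise
lemma pvCalc_eq_ok (num : Int) : pvCalc num = pvOkB num := by
  rcases lt_trichotomy num 0 with hneg | hzero | hpos
  · -- negative: A scans 'b'<digits>, whose first chunk is never allowed; B rejects num <= 0
    have hb : PySem.List.slice (PySem.Int.toBinChars0b num) (some 2) none
        = 'b' :: Nat.toDigits 2 num.natAbs := by
      rw [PySem.Int.toBinChars0b, if_pos hneg, PySem.List.slice_some_none]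
      simp [PySem.List.clampIdx]
    unfold pvCalc
    simp only [hb]
    set b := 'b' :: Nat.toDigits 2 num.natAbs with hbdef
    rw [show min 3 b.length = min (0 + 3) b.length from by omega,
      pvCalcLoop_eq (b.length + 1) b 0 (by omega), List.drop_zero]
    have hcf : pvChunksOK b = false := by
      rw [hbdef, pvChunksOK, pvAvail_b]
      simp
    rw [hcf]
    unfold pvOkB
    rw [if_pos (show num ≤ 0 by omega)]
    simp
  · subst hzero
    decide
  · exact pvMain num hpos

-- ===== VERDICT =====
theorem solution_spec : Claim_equal_solution := by
  intro numbers _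
  unfold Spec_solution solution solution_alt
  exact List.map_congr_left (fun x _ => pvCalc_eq_ok x)
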